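-- pv_equiv track=rewrite | github.com/pumperknickle/batchchecker | AcronymExtractor.py | is_abbrev
-- ===== SOURCE A (Python) =====
-- def is_abbrev(abbrev, text):
--   abbrev=abbrev.lower()
--   text=text.lower()
--   words=text.split()
--   if not abbrev:
--     return True
--   if abbrev and not text:
--     return False
--   if abbrev[0]!=text[0]:
--     return False
--   else:
--     return (is_abbrev(abbrev[1:],' '.join(words[1:])) or any(is_abbrev(abbrev[1:]," ".join(words[i+1:])) for i in range(len(words[0]))))
-- ===== SOURCE B (Python) =====
-- def is_abbrev(abbrev, text):
--     abbrev = abbrev.lower()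
--     text = text.lower()
--     if not abbrev:
--         return True
--     if not text or abbrev[0] != text[0]:
--         return False
--     words = text.split()
--     n = len(words)
--     # Bottom-up dynamic programming over word indices.
--     # ok[j]: the remaining abbreviation characters can all be matched starting
--     # at word j (matching a character at word j lets the match continue at any
--     # of the next len(words[j]) words); ok[n] covers "past the last word".
--     ok = [True] * (n + 1)
--     for c in reversed(abbrev[1:]):
--         ok = [j < n and words[j][0] == c and any(ok[j + 1 : j + 1 + len(words[j])])
--               for j in range(n + 1)]
--     # abbrev[0] already matched text[0]; the rest must match from a word
--     # reachable from word 0.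
--     return len(abbrev) == 1 or any(ok[1 : 1 + len(words[0])])
-- ===== Notes on version B (the rewrite author's own statement) =====
-- stated objective: faster
-- what changed: Replaced A's branching recursion over re-split text suffixes by a bottom-up dynamic program over word indices (one boolean row per abbreviation character); Pre_ excludes only the inputs where A raises IndexError (whitespace-only nonempty text whose first character equals the lowercased abbreviation's first character, abbreviation length >= 2), where B raises too.
import Mathlib
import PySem

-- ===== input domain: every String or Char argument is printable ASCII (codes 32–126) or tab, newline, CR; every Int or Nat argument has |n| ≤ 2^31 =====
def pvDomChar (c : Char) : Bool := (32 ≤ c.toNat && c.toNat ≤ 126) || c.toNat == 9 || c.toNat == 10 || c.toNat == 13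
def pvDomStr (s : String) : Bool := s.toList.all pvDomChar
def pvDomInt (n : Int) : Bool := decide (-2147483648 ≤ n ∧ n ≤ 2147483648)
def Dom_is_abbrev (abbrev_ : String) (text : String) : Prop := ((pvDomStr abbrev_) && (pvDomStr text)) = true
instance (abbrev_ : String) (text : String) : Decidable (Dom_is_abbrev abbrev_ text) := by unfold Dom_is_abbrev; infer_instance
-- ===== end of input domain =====

-- B replaces A's branching recursion over re-split text suffixes by a bottom-up
-- boolean dynamic program over word indices: an asymptotically faster exact algorithm.


-- ===== PORT A =====
-- ' '.join(words)
def pvJoin (ws : List (List Char)) : List Char := PySem.Chars.join [' '] ws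

-- literal transliteration of A's recursion (on the code-point lists of the strings).
-- 'words.headD []' stands for Python's words[0]: when words = [] Python raises IndexError
-- there (excluded by Pre_); the default makes the port total.
def pvACore (a t : List Char) : Bool :=
  if hal : PySem.Chars.lower a = [] then true
  else if PySem.Chars.lower t = [] then false
  else if (PySem.Chars.lower a).head? ≠ (PySem.Chars.lower t).head? then false
  else
    pvACore (PySem.Chars.lower a).tail
        (pvJoin ((PySem.Chars.split₀ (PySem.Chars.lower t)).drop 1)) ||
    (List.range ((PySem.Chars.split₀ (PySem.Chars.lower t)).headD []).length).any
      (fun i => pvACore (PySem.Chars.lower a).tail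
        (pvJoin ((PySem.Chars.split₀ (PySem.Chars.lower t)).drop (i+1))))
termination_by a.length
decreasing_by
  all_goals
    simp only [PySem.Chars.lower] at hal ⊢
    cases a <;> simp_all

def is_abbrev (abbrev_ : String) (text : String) : Bool :=
  pvACore abbrev_.toList text.toList

-- ===== PORT B =====
-- transliteration of Source B: one DP row per abbreviation character, processed right
-- to left ('for c in reversed(abbrev[1:])' = foldl over the reversed tail).
-- The slice ok[j+1 : j+1+len(words[j])] has nonnegative bounds, so it is drop/take;
-- 'words.getD j []' / 'words.headD []' stand for words[j] / words[0] (in-range inside Pre_).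
def is_abbrev_alt (abbrev_ : String) (text : String) : Bool :=
  let a := PySem.Chars.lower abbrev_.toList
  let t := PySem.Chars.lower text.toList
  if a = [] then true
  else if t = [] || (a.head? ≠ t.head?) then false
  else
    let words := PySem.Chars.split₀ t
    let n := words.length
    let ok := (a.tail.reverse).foldl (fun ok c =>
      (List.range (n+1)).map (fun j =>
        decide (j < n) && ((words.getD j []).head? == some c) &&
          ((ok.drop (j+1)).take (words.getD j []).length).any id))
      (List.replicate (n+1) true)
    decide (a.length = 1) || ((ok.drop 1).take (words.headD []).length).any id

-- ===== PRECONDITION & SPEC =====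
-- Pre_ excludes exactly the inputs on which the Python A raises IndexError: a nonempty
-- all-whitespace text whose first character equals the (lowercased) first character of an
-- abbreviation of length ≥ 2 (then words = [] and A evaluates words[0]); B raises there too.
def Pre_is_abbrev (abbrev_ : String) (text : String) : Prop :=
  ¬ (text.toList ≠ [] ∧ (∀ c ∈ text.toList, PySem.Chars.isspace c = true) ∧
      2 ≤ abbrev_.toList.length ∧
      (PySem.Chars.lower abbrev_.toList).head? = (PySem.Chars.lower text.toList).head?)
instance (abbrev_ : String) (text : String) : Decidable (Pre_is_abbrev abbrev_ text) := by
  unfold Pre_is_abbrev; infer_instance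

def pvWitness_is_abbrev : String × String := ("", "")

def Spec_is_abbrev (abbrev_ : String) (text : String) (out : Bool) : Prop := out = is_abbrev_alt abbrev_ text
instance (abbrev_ : String) (text : String) (out : Bool) : Decidable (Spec_is_abbrev abbrev_ text out) := by unfold Spec_is_abbrev; infer_instance

-- ===== CLAIM (what is proved, stated in full; the proofs are below) =====
def Claim_equal_is_abbrev : Prop := ∀ (abbrev_ : String) (text : String), Dom_is_abbrev abbrev_ text → Pre_is_abbrev abbrev_ text → Spec_is_abbrev abbrev_ text (is_abbrev abbrev_ text)

-- ===== LEMMAS AND PROOFS =====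

-- a word of the split: nonempty, no whitespace, all characters fixed by lowercasing
def pvGoodW (w : List Char) : Prop :=
  w ≠ [] ∧ ∀ c ∈ w, PySem.Chars.isspace c = false ∧ PySem.Chars.lowerChar c = c
def pvGood (ws : List (List Char)) : Prop := ∀ w ∈ ws, pvGoodW w

-- the reference specification both ports are reduced to
def pvF : List Char → List (List Char) → Bool
  | [], _ => true
  | _ :: _, [] => false
  | c :: a, w :: ws =>
      (w.head? == some c) &&
        (List.range w.length).any (fun i => pvF a ((w :: ws).drop (i+1)))

theorem char_le_iff (a c : Char) : (a ≤ c) ↔ a.toNat ≤ c.toNat := by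
  rw [Char.le_def, UInt32.le_iff_toNat_le]; rfl

theorem isupper_toNat (c : Char) :
    PySem.Chars.isupper c = true ↔ (65 ≤ c.toNat ∧ c.toNat ≤ 90) := by
  unfold PySem.Chars.isupper
  simp only [Bool.and_eq_true, decide_eq_true_eq, char_le_iff]
  constructor <;> (intro h; exact ⟨h.1, h.2⟩)

theorem lowerChar_idem (c : Char) :
    PySem.Chars.lowerChar (PySem.Chars.lowerChar c) = PySem.Chars.lowerChar c := by
  unfold PySem.Chars.lowerChar
  by_cases hu : PySem.Chars.isupper c = true
  · rw [if_pos hu]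
    have hub := (isupper_toNat c).mp hu
    have hv : (Char.ofNat (c.toNat + 32)).toNat = c.toNat + 32 := by
      rw [Char.toNat_ofNat, if_pos (by left; omega)]
    have : ¬ PySem.Chars.isupper (Char.ofNat (c.toNat + 32)) = true := by
      rw [isupper_toNat, hv]; omega
    rw [if_neg this]
  · rw [if_neg hu, if_neg hu]

theorem lower_idem (l : List Char) :
    PySem.Chars.lower (PySem.Chars.lower l) = PySem.Chars.lower l := by
  simp [PySem.Chars.lower, Function.comp, lowerChar_idem]

theorem pvJoin_nil : pvJoin [] = [] := rfl
theorem pvJoin_singleton (w : List Char) : pvJoin [w] = w := by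
  simp [pvJoin, PySem.Chars.join, List.intercalate]
theorem pvJoin_cons_cons (w v : List Char) (vs : List (List Char)) :
    pvJoin (w :: v :: vs) = w ++ ' ' :: pvJoin (v :: vs) := by
  simp [pvJoin, PySem.Chars.join, List.intercalate]

theorem go_word (w : List Char) : ∀ (rest cur : List Char) (acc : List (List Char)),
    (∀ c ∈ w, PySem.Chars.isspace c = false) →
    PySem.Chars.split₀.go (w ++ rest) cur acc
      = PySem.Chars.split₀.go rest (w.reverse ++ cur) acc := by
  induction w with
  | nil => intro rest cur acc _; simp
  | cons c w ih =>
      intro rest cur acc hw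
      rw [List.cons_append, PySem.Chars.split₀.go]
      rw [if_neg (by simp [hw c (by simp)])]
      rw [ih rest (c :: cur) acc (fun d hd => hw d (by simp [hd]))]
      simp

theorem split₀_join (ws : List (List Char)) : ∀ (acc : List (List Char)),
    (∀ w ∈ ws, w ≠ [] ∧ ∀ c ∈ w, PySem.Chars.isspace c = false) →
    PySem.Chars.split₀.go (pvJoin ws) [] acc = acc.reverse ++ ws := by
  induction ws with
  | nil =>
      intro acc _
      rw [pvJoin_nil, PySem.Chars.split₀.go]
      simp
  | cons w ws ih =>
      intro acc h
      have hw := h w (by simp)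
      cases ws with
      | nil =>
          rw [show pvJoin [w] = w ++ [] by simp [pvJoin_singleton]]
          rw [go_word w [] [] acc hw.2, PySem.Chars.split₀.go]
          rw [if_neg (by simpa using hw.1)]
          simp
      | cons v vs =>
          rw [show pvJoin (w :: v :: vs) = w ++ (' ' :: pvJoin (v :: vs)) from
                pvJoin_cons_cons w v vs]
          rw [go_word w _ [] acc hw.2, PySem.Chars.split₀.go]
          rw [if_pos (by decide)]
          rw [if_neg (by simpa using hw.1)]
          simp only [List.append_nil, List.reverse_reverse]
          rw [ih (w :: acc) (fun u hu => h u (by simp [hu]))]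
          simp

theorem go_good (s : List Char) : ∀ (cur : List Char) (acc : List (List Char)),
    (∀ c ∈ s, PySem.Chars.lowerChar c = c) →
    (∀ c ∈ cur, PySem.Chars.isspace c = false ∧ PySem.Chars.lowerChar c = c) →
    pvGood acc →
    pvGood (PySem.Chars.split₀.go s cur acc) := by
  induction s with
  | nil =>
      intro cur acc _ hcur hacc
      rw [PySem.Chars.split₀.go]
      split
      · intro w hw
        exact hacc w (List.mem_reverse.mp hw)
      · rename_i hne
        intro w hw
        simp only [List.mem_reverse, List.mem_cons] at hw
        rcases hw with h1 | h2
        · subst h1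
          refine ⟨by simpa using hne, ?_⟩
          intro c hc
          exact hcur c (by simpa using hc)
        · exact hacc w h2
  | cons c s ih =>
      intro cur acc hs hcur hacc
      rw [PySem.Chars.split₀.go]
      by_cases hsp : PySem.Chars.isspace c = true
      · rw [if_pos hsp]
        split
        · exact ih [] acc (fun d hd => hs d (by simp [hd])) (by simp) hacc
        · rename_i hne
          refine ih [] _ (fun d hd => hs d (by simp [hd])) (by simp) ?_
          intro w hw
          simp only [List.mem_cons] at hw
          rcases hw with h1 | h2
          · subst h1
            refine ⟨by simpa using hne, fun d hd => hcur d (by simpa using hd)⟩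
          · exact hacc w h2
      · rw [if_neg hsp]
        refine ih (c :: cur) acc (fun d hd => hs d (by simp [hd])) ?_ hacc
        intro d hd
        rcases List.mem_cons.mp hd with h1 | h2
        · rw [h1]; exact ⟨by simpa using hsp, hs c (by simp)⟩
        · exact hcur d h2

theorem good_split₀ (t : List Char) (h : ∀ c ∈ t, PySem.Chars.lowerChar c = c) :
    pvGood (PySem.Chars.split₀ t) := by
  refine go_good t [] [] h (by simp) ?_
  intro w hw
  simp at hw

theorem lower_join (ws : List (List Char)) :
    (∀ w ∈ ws, ∀ c ∈ w, PySem.Chars.lowerChar c = c) →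
    PySem.Chars.lower (pvJoin ws) = pvJoin ws := by
  induction ws with
  | nil => intro _; rfl
  | cons w ws ih =>
      intro h
      have hw : PySem.Chars.lower w = w :=
        List.map_congr_left (fun c hc => h w (by simp) c hc) |>.trans (List.map_id w)
      cases ws with
      | nil => simpa [pvJoin_singleton] using hw
      | cons v vs =>
          rw [pvJoin_cons_cons]
          show PySem.Chars.lower (w ++ ' ' :: pvJoin (v :: vs)) = _
          unfold PySem.Chars.lower at *
          rw [List.map_append, hw, List.map_cons]
          rw [show PySem.Chars.lowerChar ' ' = ' ' from rfl]
          rw [ih (fun u hu => h u (by simp [hu]))]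

theorem pvJoin_cons_ne_nil (w : List Char) (ws : List (List Char)) (hw : w ≠ []) :
    pvJoin (w :: ws) ≠ [] := by
  cases ws with
  | nil => simpa [pvJoin_singleton] using hw
  | cons v vs => rw [pvJoin_cons_cons]; simp

theorem pvJoin_cons_head? (w : List Char) (ws : List (List Char)) (hw : w ≠ []) :
    (pvJoin (w :: ws)).head? = w.head? := by
  cases ws with
  | nil => rw [pvJoin_singleton]
  | cons v vs =>
      rw [pvJoin_cons_cons]
      cases w with
      | nil => exact absurd rfl hw
      | cons c cs => rfl

theorem absorb (L : Nat) (f : Nat → Bool) (hL : 0 < L) :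
    (f 0 || (List.range L).any f) = (List.range L).any f := by
  cases h : (List.range L).any f with
  | true => simp
  | false =>
      have := List.any_eq_false.mp h 0 (List.mem_range.mpr hL)
      simp [this]

theorem pvGood_drop (ws : List (List Char)) (k : Nat) (h : pvGood ws) :
    pvGood (ws.drop k) := fun w hw => h w (List.drop_subset _ _ hw)

theorem lower_cons (c : Char) (a : List Char) :
    PySem.Chars.lower (c :: a) = PySem.Chars.lowerChar c :: PySem.Chars.lower a := rfl

theorem split₀_pvJoin (ws : List (List Char)) (hg : pvGood ws) :
    PySem.Chars.split₀ (pvJoin ws) = ws := by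
  show PySem.Chars.split₀.go _ [] [] = _
  simpa using split₀_join ws []
    (fun u hu => ⟨(hg u hu).1, fun d hd => ((hg u hu).2 d hd).1⟩)

-- A's recursion evaluates to pvF on a whitespace-joined good word list
theorem aCore_eq_pvF (n : Nat) : ∀ (a : List Char) (ws : List (List Char)),
    a.length ≤ n → pvGood ws → pvACore a (pvJoin ws) = pvF (PySem.Chars.lower a) ws := by
  induction n with
  | zero =>
      intro a ws hlen _
      have ha : a = [] := List.eq_nil_of_length_eq_zero (Nat.le_zero.mp hlen)
      subst ha
      rw [pvACore]
      rw [dif_pos (show PySem.Chars.lower ([] : List Char) = [] from rfl)]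
      rfl
  | succ n ih =>
      intro a ws hlen hg
      cases a with
      | nil =>
          rw [pvACore, dif_pos (show PySem.Chars.lower ([] : List Char) = [] from rfl)]
          rfl
      | cons c a' =>
          have hne : PySem.Chars.lower (c :: a') ≠ [] := by rw [lower_cons]; simp
          have hfix : ∀ w ∈ ws, ∀ d ∈ w, PySem.Chars.lowerChar d = d :=
            fun w hw d hd => ((hg w hw).2 d hd).2
          have hlj : PySem.Chars.lower (pvJoin ws) = pvJoin ws := lower_join ws hfix
          rw [pvACore, dif_neg hne, hlj]
          cases ws with
          | nil =>
              rw [if_pos pvJoin_nil, lower_cons]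
              rfl
          | cons w ws' =>
              have hwg := hg w (by simp)
              have hwne : w ≠ [] := hwg.1
              rw [if_neg (pvJoin_cons_ne_nil w ws' hwne)]
              rw [pvJoin_cons_head? w ws' hwne]
              rw [split₀_pvJoin (w :: ws') hg]
              have hrec : ∀ k, pvACore (PySem.Chars.lower (c :: a')).tail
                  (pvJoin ((w :: ws').drop k)) = pvF (PySem.Chars.lower a') ((w :: ws').drop k) := by
                intro k
                have ht : (PySem.Chars.lower (c :: a')).tail = PySem.Chars.lower a' := rfl
                have hl : (PySem.Chars.lower a').length ≤ n := by
                  simpa [PySem.Chars.lower] using Nat.le_of_succ_le_succ hlen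
                rw [ht, ih (PySem.Chars.lower a') _ hl (pvGood_drop _ k hg), lower_idem]
              by_cases hc : (some (PySem.Chars.lowerChar c) : Option Char) = w.head?
              · rw [if_neg (by rw [lower_cons]; simp [hc])]
                rw [hrec 1]
                have hfun : (fun i => pvACore (PySem.Chars.lower (c :: a')).tail
                      (pvJoin ((w :: ws').drop (i+1))))
                    = fun i => pvF (PySem.Chars.lower a') ((w :: ws').drop (i+1)) :=
                  funext (fun i => hrec (i+1))
                rw [hfun, lower_cons, pvF]
                have hb : (w.head? == some (PySem.Chars.lowerChar c)) = true := by
                  simp [← hc]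
                rw [hb, Bool.true_and]
                rw [List.headD_cons]
                have habs := absorb w.length
                  (fun i => pvF (PySem.Chars.lower a') ((w :: ws').drop (i+1)))
                  (List.length_pos_of_ne_nil hwne)
                simpa using habs
              · rw [if_pos (by rw [lower_cons]; simp; exact fun h => hc h)]
                rw [lower_cons, pvF]
                have hb : (w.head? == some (PySem.Chars.lowerChar c)) = false := by
                  simp
                  intro h
                  exact hc h.symm
                rw [hb, Bool.false_and]

theorem window (g : List (List Char) → Bool) (ws : List (List Char)) (j L : Nat)
    (hL : 0 < L) (hj : j < ws.length) :
    ((∃ i, i < L ∧ g (ws.drop (j+i+1)) = true) ↔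
      (∃ k, k < ws.length + 1 ∧ (j < k ∧ k ≤ min (j+L) ws.length) ∧ g (ws.drop k) = true)) := by
  constructor
  · rintro ⟨i, hi, hg⟩
    by_cases hle : j + i + 1 ≤ ws.length
    · exact ⟨j+i+1, by omega, by omega, hg⟩
    · refine ⟨ws.length, by omega, by omega, ?_⟩
      rw [List.drop_length]
      rw [List.drop_eq_nil_of_le (by omega)] at hg
      exact hg
  · rintro ⟨k, hk, ⟨hjk, hkm⟩, hg⟩
    by_cases hkl : k < ws.length
    · exact ⟨k - j - 1, by omega, by rw [show j + (k-j-1) + 1 = k by omega]; exact hg⟩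
    · have hk' : k = ws.length := by omega
      refine ⟨L - 1, by omega, ?_⟩
      rw [List.drop_eq_nil_of_le (by omega)]
      rw [hk', List.drop_length] at hg
      exact hg

-- the DP step and rows of B's fold, named for the proofs
def pvStep (ws : List (List Char)) (ok : List Bool) (c : Char) : List Bool :=
  (List.range (ws.length+1)).map (fun j =>
    decide (j < ws.length) && ((ws.getD j []).head? == some c) &&
      ((ok.drop (j+1)).take (ws.getD j []).length).any id)

def pvRow (ws : List (List Char)) (s : List Char) : List Bool :=
  s.foldr (fun c ok => pvStep ws ok c) (List.replicate (ws.length+1) true)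

theorem pvRow_length (ws : List (List Char)) (s : List Char) :
    (pvRow ws s).length = ws.length + 1 := by
  cases s with
  | nil => simp [pvRow]
  | cons c s => simp [pvRow, pvStep]

theorem any_take_drop (l : List Bool) (m L : Nat) :
    ((l.drop m).take L).any id = true ↔
      ∃ k, m ≤ k ∧ k < min (m+L) l.length ∧ l.getD k false = true := by
  rw [List.any_eq_true]
  constructor
  · rintro ⟨b, hb, hid⟩
    obtain ⟨i, hi, hgi⟩ := List.mem_iff_getElem.mp hb
    simp only [List.length_take, List.length_drop] at hi
    have hil : m + i < l.length := by omega
    have : l[m+i] = b := by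
      rw [← hgi, List.getElem_take, List.getElem_drop]
    refine ⟨m + i, by omega, by omega, ?_⟩
    rw [List.getD_eq_getElem l false hil, this]
    simpa using hid
  · rintro ⟨k, hm, hk, hgd⟩
    have hkl : k < l.length := by omega
    refine ⟨true, ?_, rfl⟩
    apply List.mem_iff_getElem.mpr
    refine ⟨k - m, by simp [List.length_take, List.length_drop]; omega, ?_⟩
    rw [List.getElem_take, List.getElem_drop]
    rw [List.getD_eq_getElem l false hkl] at hgd
    simpa [show m + (k - m) = k from by omega] using hgd

theorem pvRow_getD (ws : List (List Char)) (hg : pvGood ws) (s : List Char) :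
    ∀ j, j < ws.length + 1 →
      (pvRow ws s).getD j false = pvF s (ws.drop j) := by
  induction s with
  | nil =>
      intro j hj
      rw [pvRow, List.foldr_nil, List.getD_eq_getElem _ false (by simpa using hj),
        List.getElem_replicate]
      rfl
  | cons c s' ih =>
      intro j hj
      have hrow : pvRow ws (c :: s') = pvStep ws (pvRow ws s') c := rfl
      rw [hrow, pvStep, PySem.List.getD_map_range _ _ _ _ hj]
      by_cases hjn : j < ws.length
      · have hdj : ws.getD j [] = ws[j] := List.getD_eq_getElem ws [] hjn
        rw [List.drop_eq_getElem_cons hjn, pvF, decide_eq_true hjn, Bool.true_and, hdj]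
        congr 1
        have hLpos : 0 < ws[j].length :=
          List.length_pos_of_ne_nil (hg ws[j] (List.getElem_mem hjn)).1
        rw [Bool.eq_iff_iff, any_take_drop, List.any_eq_true]
        have hlen : (pvRow ws s').length = ws.length + 1 := pvRow_length ws s'
        constructor
        · rintro ⟨k, hmk, hk, hgd⟩
          rw [hlen] at hk
          rw [ih k (by omega)] at hgd
          obtain ⟨i, hi, hFi⟩ := (window (fun l => pvF s' l) ws j ws[j].length hLpos hjn).mpr
            ⟨k, by omega, ⟨by omega, by omega⟩, hgd⟩
          refine ⟨i, List.mem_range.mpr hi, ?_⟩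
          have : (ws[j] :: ws.drop (j+1)).drop (i+1) = ws.drop (j+i+1) := by
            rw [show (ws[j] :: ws.drop (j+1)).drop (i+1) = (ws.drop (j+1)).drop i from rfl,
                List.drop_drop]
            congr 1
            omega
          rw [this]
          exact hFi
        · rintro ⟨i, himem, hFi⟩
          have hi : i < ws[j].length := List.mem_range.mp himem
          have hdd : (ws[j] :: ws.drop (j+1)).drop (i+1) = ws.drop (j+i+1) := by
            rw [show (ws[j] :: ws.drop (j+1)).drop (i+1) = (ws.drop (j+1)).drop i from rfl,
                List.drop_drop]
            congr 1
            omega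
          rw [hdd] at hFi
          obtain ⟨k, hk, ⟨hjk, hkm⟩, hFk⟩ :=
            (window (fun l => pvF s' l) ws j ws[j].length hLpos hjn).mp ⟨i, hi, hFi⟩
          refine ⟨k, by omega, ?_, ?_⟩
          · rw [hlen]; omega
          · rw [ih k (by omega)]
            exact hFk
      · have hjeq : j = ws.length := by omega
        subst hjeq
        rw [List.drop_length, decide_eq_false hjn]
        rfl

theorem lower_fix (t : List Char) :
    ∀ c ∈ PySem.Chars.lower t, PySem.Chars.lowerChar c = c := by
  intro c hc
  obtain ⟨d, _, rfl⟩ := List.mem_map.mp hc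
  exact lowerChar_idem d

theorem tail_lower (a : List Char) :
    (PySem.Chars.lower a).tail = PySem.Chars.lower a.tail := by
  cases a <;> rfl

theorem ports_agree (abbrev_ text : String) :
    is_abbrev abbrev_ text = is_abbrev_alt abbrev_ text := by
  rw [show is_abbrev abbrev_ text = pvACore abbrev_.toList text.toList from rfl]
  rw [pvACore]
  simp only [is_abbrev_alt]
  by_cases h1 : PySem.Chars.lower abbrev_.toList = []
  · rw [dif_pos h1, if_pos h1]
  · rw [dif_neg h1, if_neg h1]
    by_cases h2 : PySem.Chars.lower text.toList = []
    · rw [if_pos h2, if_pos (by simp [h2])]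
    · by_cases h3 : (PySem.Chars.lower abbrev_.toList).head?
          ≠ (PySem.Chars.lower text.toList).head?
      · rw [if_neg h2, if_pos h3, if_pos (by simp [h3])]
      · rw [if_neg h2, if_neg h3, if_neg (by simp [h2]; simpa using h3)]
        have hgw : pvGood (PySem.Chars.split₀ (PySem.Chars.lower text.toList)) :=
          good_split₀ _ (lower_fix text.toList)
        have hrec : ∀ k, pvACore (PySem.Chars.lower abbrev_.toList).tail
            (pvJoin ((PySem.Chars.split₀ (PySem.Chars.lower text.toList)).drop k))
            = pvF (PySem.Chars.lower abbrev_.toList).tail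
                ((PySem.Chars.split₀ (PySem.Chars.lower text.toList)).drop k) := by
          intro k
          rw [tail_lower]
          rw [aCore_eq_pvF (PySem.Chars.lower abbrev_.toList.tail).length _ _ le_rfl
              (pvGood_drop _ k hgw)]
          rw [lower_idem]
        have hfold : ∀ ws : List (List Char),
            ((PySem.Chars.lower abbrev_.toList).tail.reverse).foldl
                (fun ok c => (List.range (ws.length+1)).map (fun j =>
                  decide (j < ws.length) && ((ws.getD j []).head? == some c) &&
                    ((ok.drop (j+1)).take (ws.getD j []).length).any id))
                (List.replicate (ws.length+1) true)
              = pvRow ws (PySem.Chars.lower abbrev_.toList).tail := by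
          intro ws
          rw [List.foldl_reverse]
          rfl
        cases hw : PySem.Chars.split₀ (PySem.Chars.lower text.toList) with
        | nil =>
            -- words = []: both sides reduce to "the abbreviation has length 1"
            rw [hw] at hrec
            rw [hfold []]
            simp only [List.headD_nil, List.length_nil, List.range_zero, List.any_nil,
              Bool.or_false, List.take_zero]
            rw [show pvJoin (List.drop 1 ([] : List (List Char)))
                  = pvJoin (List.drop 0 ([] : List (List Char))) from rfl]
            rw [hrec 0]
            simp only [List.drop_nil]
            obtain ⟨c, a', hca⟩ := List.exists_cons_of_ne_nil h1
            rw [hca]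
            cases a' with
            | nil => simp [pvF]
            | cons d a'' => simp [pvF]
        | cons w ws' =>
            rw [hw] at hrec hgw
            have hwne : w ≠ [] := (hgw w (by simp)).1
            have hwpos : 0 < w.length := List.length_pos_of_ne_nil hwne
            rw [hfold (w :: ws')]
            have hfun : (fun i => pvACore (PySem.Chars.lower abbrev_.toList).tail
                  (pvJoin ((w :: ws').drop (i+1))))
                = fun i => pvF (PySem.Chars.lower abbrev_.toList).tail ((w :: ws').drop (i+1)) :=
              funext (fun i => hrec (i+1))
            rw [hrec 1, hfun, List.headD_cons]
            have habs := absorb w.length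
              (fun i => pvF (PySem.Chars.lower abbrev_.toList).tail ((w :: ws').drop (i+1)))
              hwpos
            rw [show pvF (PySem.Chars.lower abbrev_.toList).tail ((w :: ws').drop 1)
                  = (fun i => pvF (PySem.Chars.lower abbrev_.toList).tail
                      ((w :: ws').drop (i+1))) 0 from rfl]
            rw [habs]
            cases hs : (PySem.Chars.lower abbrev_.toList).tail with
            | nil =>
                -- single-character abbreviation: both sides are true
                have hlen1 : (PySem.Chars.lower abbrev_.toList).length = 1 := by
                  have h0 : (PySem.Chars.lower abbrev_.toList).length ≠ 0 :=
                    fun h => h1 (List.eq_nil_of_length_eq_zero h)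
                  have ht := congrArg List.length hs
                  rw [List.length_tail] at ht
                  simp at ht
                  omega
                rw [decide_eq_true hlen1, Bool.true_or]
                rw [show (fun i => pvF ([] : List Char) ((w :: ws').drop (i+1)))
                      = fun _ => true from funext (fun i => rfl)]
                rw [List.any_eq_true]
                exact ⟨0, List.mem_range.mpr hwpos, rfl⟩
            | cons c s'' =>
                have hlen1 : ¬ (PySem.Chars.lower abbrev_.toList).length = 1 := by
                  intro hl
                  have ht := congrArg List.length hs
                  rw [List.length_tail, hl] at ht
                  simp at ht
                rw [decide_eq_false hlen1, Bool.false_or]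
                rw [Bool.eq_iff_iff, List.any_eq_true, any_take_drop]
                have hlenrow : (pvRow (w :: ws') (c :: s'')).length = (w :: ws').length + 1 :=
                  pvRow_length _ _
                constructor
                · rintro ⟨i, himem, hFi⟩
                  have hi : i < w.length := List.mem_range.mp himem
                  obtain ⟨k, hk, ⟨hjk, hkm⟩, hFk⟩ :=
                    (window (fun l => pvF (c :: s'') l)
                      (w :: ws') 0 w.length hwpos (by simp)).mp
                      ⟨i, hi, by simpa using hFi⟩
                  refine ⟨k, by omega, by rw [hlenrow]; omega, ?_⟩
                  rw [pvRow_getD (w :: ws') hgw (c :: s'') k hk]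
                  exact hFk
                · rintro ⟨k, h1k, hk, hgd⟩
                  rw [hlenrow] at hk
                  rw [pvRow_getD (w :: ws') hgw (c :: s'') k (by omega)] at hgd
                  obtain ⟨i, hi, hFi⟩ :=
                    (window (fun l => pvF (c :: s'') l)
                      (w :: ws') 0 w.length hwpos (by simp)).mpr
                      ⟨k, by omega, ⟨by omega, by simp only [List.length_cons] at hk ⊢; omega⟩, hgd⟩
                  refine ⟨i, List.mem_range.mpr hi, ?_⟩
                  simpa using hFi

-- ===== VERDICT (by name: the statement is the Claim_ definition above) =====
theorem is_abbrev_spec : Claim_equal_is_abbrev := by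
  intro a t _ _
  unfold Spec_is_abbrev
  exact ports_agree a t
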